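-- pv_equiv track=rewrite | github.com/matinamehdizadeh/Bioinformatic_CE494 | Align Two Strings Using Linear Space/rosalind_ba5l_869_3_code.py | middle_score
-- ===== SOURCE A (Python) =====
-- score_matrix = [[4, 0, -2, -1, -2, 0, -2, -1, -1, -1, -1, -2, -1, -1, -1, 1, 0, 0, -3, -2],
--                 [0, 9, -3, -4, -2, -3, -3, -1, -3, -1, -1, -3, -3, -3, -3, -1, -1, -1, -2, -2],
--                 [-2, -3, 6, 2, -3, -1, -1, -3, -1, -4, -3, 1, -1, 0, -2, 0, -1, -3, -4, -3],
--                 [-1, -4, 2, 5, -3, -2, 0, -3, 1, -3, -2, 0, -1, 2, 0, 0, -1, -2, -3, -2],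
--                 [-2, -2, -3, -3, 6, -3, -1, 0, -3, 0, 0, -3, -4, -3, -3, -2, -2, -1, 1, 3],
--                 [0, -3, -1, -2, -3, 6, -2, -4, -2, -4, -3, 0, -2, -2, -2, 0, -2, -3, -2, -3],
--                 [-2, -3, -1, 0, -1, -2, 8, -3, -1, -3, -2, 1, -2, 0, 0, -1, -2, -3, -2, 2],
--                 [-1, -1, -3, -3, 0, -4, -3, 4, -3, 2, 1, -3, -3, -3, -3, -2, -1, 3, -3, -1],
--                 [-1, -3, -1, 1, -3, -2, -1, -3, 5, -2, -1, 0, -1, 1, 2, 0, -1, -2, -3, -2],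
--                 [-1, -1, -4, -3, 0, -4, -3, 2, -2, 4, 2, -3, -3, -2, -2, -2, -1, 1, -2, -1],
--                 [-1, -1, -3, -2, 0, -3, -2, 1, -1, 2, 5, -2, -2, 0, -1, -1, -1, 1, -1, -1],
--                 [-2, -3, 1, 0, -3, 0, 1, -3, 0, -3, -2, 6, -2, 0, 0, 1, 0, -3, -4, -2],
--                 [-1, -3, -1, -1, -4, -2, -2, -3, -1, -3, -2, -2, 7, -1, -2, -1, -1, -2, -4, -3],
--                 [-1, -3, 0, 2, -3, -2, 0, -3, 1, -2, 0, 0, -1, 5, 1, 0, -1, -2, -2, -1],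
--                 [-1, -3, -2, 0, -3, -2, 0, -3, 2, -2, -1, 0, -2, 1, 5, -1, -1, -3, -3, -2],
--                 [1, -1, 0, 0, -2, 0, -1, -2, 0, -2, -1, 1, -1, 0, -1, 4, 1, -2, -3, -2],
--                 [0, -1, -1, -1, -2, -2, -2, -1, -1, -1, -1, 0, -1, -1, -1, 1, 5, 0, -2, -2],
--                 [0, -1, -3, -2, -1, -3, -3, 3, -2, 1, 1, -3, -2, -2, -3, -2, 0, 4, -3, -1],
--                 [-3, -2, -4, -3, 1, -2, -2, -3, -3, -2, -1, -4, -4, -2, -3, -3, -2, -3, 11, 2],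
--                 [-2, -2, -3, -2, 3, -3, 2, -1, -2, -1, -1, -2, -3, -1, -2, -2, -2, -1, 2, 7]]
--
-- find_middle = [0, -1, 1, 2, 3, 4, 5, 6, 7, -1, 8, 9, 10, 11, -1, 12, 13, 14, 15, 16, -1, 17, 18, -1, 19, -1]
--
-- def middle_score(s1, s2, number):
--     n1 = len(s1)
--     n2 = len(s2)
--     if n2 % 2 != 0:
--         if number == 1:
--             n2 -= 1
--         else:
--             n2 += 1
--     dp1 = [0] * (len(s1) + 1)
--     dp2 = [0] * (len(s1) + 1)
--     pre = [0] * (len(s1) + 1)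
--     if number == 2:
--         s1 = s1[::-1]
--         s2 = s2[::-1]
--     for i in range(n1 + 1):
--         dp1[i] = -5 * i
--     for i in range(1, int(n2 / 2) + 1):
--         for j in range(n1 + 1):
--             if j == 0:
--                 dp2[0] = i * (-5)
--             else:
--                 a = ord(s1[j - 1]) - ord('A')
--                 b = ord(s2[i - 1]) - ord('A')
--                 z = dp1[j - 1] + score_matrix[find_middle[a]][find_middle[b]]
--                 dp2[j] = max(dp1[j] - 5, dp2[j - 1] - 5, z)
--                 if dp2[j] == z:
--                     pre[j] = 0
--                 elif dp2[j] == dp1[j] - 5: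
--                     pre[j] = 1
--                 elif dp2[j] == dp2[j - 1] - 5:
--                     pre[j] = 2
--         dp1[:] = dp2[:]
--     if number == 2:
--         dp2.reverse()
--         pre.reverse()
--     return dp2, pre
-- ===== SOURCE B (Python) =====
-- score_matrix = [[4, 0, -2, -1, -2, 0, -2, -1, -1, -1, -1, -2, -1, -1, -1, 1, 0, 0, -3, -2],
--                 [0, 9, -3, -4, -2, -3, -3, -1, -3, -1, -1, -3, -3, -3, -3, -1, -1, -1, -2, -2],
--                 [-2, -3, 6, 2, -3, -1, -1, -3, -1, -4, -3, 1, -1, 0, -2, 0, -1, -3, -4, -3],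
--                 [-1, -4, 2, 5, -3, -2, 0, -3, 1, -3, -2, 0, -1, 2, 0, 0, -1, -2, -3, -2],
--                 [-2, -2, -3, -3, 6, -3, -1, 0, -3, 0, 0, -3, -4, -3, -3, -2, -2, -1, 1, 3],
--                 [0, -3, -1, -2, -3, 6, -2, -4, -2, -4, -3, 0, -2, -2, -2, 0, -2, -3, -2, -3],
--                 [-2, -3, -1, 0, -1, -2, 8, -3, -1, -3, -2, 1, -2, 0, 0, -1, -2, -3, -2, 2],
--                 [-1, -1, -3, -3, 0, -4, -3, 4, -3, 2, 1, -3, -3, -3, -3, -2, -1, 3, -3, -1],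
--                 [-1, -3, -1, 1, -3, -2, -1, -3, 5, -2, -1, 0, -1, 1, 2, 0, -1, -2, -3, -2],
--                 [-1, -1, -4, -3, 0, -4, -3, 2, -2, 4, 2, -3, -3, -2, -2, -2, -1, 1, -2, -1],
--                 [-1, -1, -3, -2, 0, -3, -2, 1, -1, 2, 5, -2, -2, 0, -1, -1, -1, 1, -1, -1],
--                 [-2, -3, 1, 0, -3, 0, 1, -3, 0, -3, -2, 6, -2, 0, 0, 1, 0, -3, -4, -2],
--                 [-1, -3, -1, -1, -4, -2, -2, -3, -1, -3, -2, -2, 7, -1, -2, -1, -1, -2, -4, -3],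
--                 [-1, -3, 0, 2, -3, -2, 0, -3, 1, -2, 0, 0, -1, 5, 1, 0, -1, -2, -2, -1],
--                 [-1, -3, -2, 0, -3, -2, 0, -3, 2, -2, -1, 0, -2, 1, 5, -1, -1, -3, -3, -2],
--                 [1, -1, 0, 0, -2, 0, -1, -2, 0, -2, -1, 1, -1, 0, -1, 4, 1, -2, -3, -2],
--                 [0, -1, -1, -1, -2, -2, -2, -1, -1, -1, -1, 0, -1, -1, -1, 1, 5, 0, -2, -2],
--                 [0, -1, -3, -2, -1, -3, -3, 3, -2, 1, 1, -3, -2, -2, -3, -2, 0, 4, -3, -1],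
--                 [-3, -2, -4, -3, 1, -2, -2, -3, -3, -2, -1, -4, -4, -2, -3, -3, -2, -3, 11, 2],
--                 [-2, -2, -3, -2, 3, -3, 2, -1, -2, -1, -1, -2, -3, -1, -2, -2, -2, -1, 2, 7]]
--
-- AMINO = "ACDEFGHIKLMNPQRSTVWY"
--
--
-- def _score(c, d):
--     return score_matrix[AMINO.index(c)][AMINO.index(d)]
--
--
-- def middle_score(s1, s2, number):
--     n1, n2 = len(s1), len(s2)
--     if n2 % 2:
--         n2 = n2 - 1 if number == 1 else n2 + 1
--     if number == 2:
--         s1, s2 = s1[::-1], s2[::-1]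
--     m = n2 // 2
--     if m == 0:
--         return [0] * (n1 + 1), [0] * (n1 + 1)
--     # column-major DP: walk along s1, keeping one column of the score table
--     # (rows 0..m); record the bottom two cells of every column for the traceback.
--     col = [-5 * i for i in range(m + 1)]
--     top2 = [(col[m - 1], col[m])]
--     for j in range(1, n1 + 1):
--         newcol = [-5 * j]
--         for i in range(1, m + 1):
--             s = _score(s1[j - 1], s2[i - 1])
--             newcol.append(max(newcol[i - 1] - 5, col[i] - 5, col[i - 1] + s))
--         top2.append((newcol[m - 1], newcol[m]))
--         col = newcol
--     dp2 = [b for _, b in top2]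
--     pre = [0]
--     for j in range(1, n1 + 1):
--         z = top2[j - 1][0] + _score(s1[j - 1], s2[m - 1])
--         if dp2[j] == z:
--             pre.append(0)
--         elif dp2[j] == top2[j][0] - 5:
--             pre.append(1)
--         else:
--             pre.append(2)
--     if number == 2:
--         dp2.reverse()
--         pre.reverse()
--     return dp2, pre
-- ===== Notes on version B (the rewrite author's own statement) =====
-- stated objective: alternative
-- what changed: A fills the DP table row by row along s2 with fused in-place pointer bookkeeping; B walks column by column along s1, keeping one column of the table and only the bottom two cells of each column, then derives the traceback in a separate final pass; scoring is by position in the amino-acid alphabet instead of the ord-arithmetic find_middle table. Pre_ excludes inputs where a character read by the DP is not one of the 20 amino-acid letters: there A either raises IndexError or returns a score picked up by accidental negative-index wraparound of find_middle, while B raises ValueError.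
-- outside the precondition, e.g. on middle_score('B', 'BB', 1): A returns ([-5, 7], [0, 0]), B raises ValueError
import Mathlib
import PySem

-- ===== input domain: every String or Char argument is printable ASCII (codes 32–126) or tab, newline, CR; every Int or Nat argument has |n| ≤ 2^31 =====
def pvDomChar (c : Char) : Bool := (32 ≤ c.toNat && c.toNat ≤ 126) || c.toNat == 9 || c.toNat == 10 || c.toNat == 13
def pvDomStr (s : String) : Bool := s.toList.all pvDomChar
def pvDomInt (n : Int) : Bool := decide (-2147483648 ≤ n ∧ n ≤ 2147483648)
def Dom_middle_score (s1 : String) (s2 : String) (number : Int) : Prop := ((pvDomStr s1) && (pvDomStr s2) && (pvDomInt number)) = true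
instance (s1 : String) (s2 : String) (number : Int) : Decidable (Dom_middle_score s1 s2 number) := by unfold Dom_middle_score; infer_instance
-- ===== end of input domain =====

-- B replaces A's row-by-row DP along s2 (fused in-place pointer bookkeeping) by a column-by-column walk
-- along s1 keeping one column plus the bottom two cells per column, with a separate final traceback pass
-- and alphabet-index scoring; objective: alternative decomposition.


-- ===== PORT A =====
-- module-level constant shared by both Python versions
def pvScoreMatrix : List (List Int) :=
  [[4, 0, -2, -1, -2, 0, -2, -1, -1, -1, -1, -2, -1, -1, -1, 1, 0, 0, -3, -2],
   [0, 9, -3, -4, -2, -3, -3, -1, -3, -1, -1, -3, -3, -3, -3, -1, -1, -1, -2, -2],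
   [-2, -3, 6, 2, -3, -1, -1, -3, -1, -4, -3, 1, -1, 0, -2, 0, -1, -3, -4, -3],
   [-1, -4, 2, 5, -3, -2, 0, -3, 1, -3, -2, 0, -1, 2, 0, 0, -1, -2, -3, -2],
   [-2, -2, -3, -3, 6, -3, -1, 0, -3, 0, 0, -3, -4, -3, -3, -2, -2, -1, 1, 3],
   [0, -3, -1, -2, -3, 6, -2, -4, -2, -4, -3, 0, -2, -2, -2, 0, -2, -3, -2, -3],
   [-2, -3, -1, 0, -1, -2, 8, -3, -1, -3, -2, 1, -2, 0, 0, -1, -2, -3, -2, 2],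
   [-1, -1, -3, -3, 0, -4, -3, 4, -3, 2, 1, -3, -3, -3, -3, -2, -1, 3, -3, -1],
   [-1, -3, -1, 1, -3, -2, -1, -3, 5, -2, -1, 0, -1, 1, 2, 0, -1, -2, -3, -2],
   [-1, -1, -4, -3, 0, -4, -3, 2, -2, 4, 2, -3, -3, -2, -2, -2, -1, 1, -2, -1],
   [-1, -1, -3, -2, 0, -3, -2, 1, -1, 2, 5, -2, -2, 0, -1, -1, -1, 1, -1, -1],
   [-2, -3, 1, 0, -3, 0, 1, -3, 0, -3, -2, 6, -2, 0, 0, 1, 0, -3, -4, -2],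
   [-1, -3, -1, -1, -4, -2, -2, -3, -1, -3, -2, -2, 7, -1, -2, -1, -1, -2, -4, -3],
   [-1, -3, 0, 2, -3, -2, 0, -3, 1, -2, 0, 0, -1, 5, 1, 0, -1, -2, -2, -1],
   [-1, -3, -2, 0, -3, -2, 0, -3, 2, -2, -1, 0, -2, 1, 5, -1, -1, -3, -3, -2],
   [1, -1, 0, 0, -2, 0, -1, -2, 0, -2, -1, 1, -1, 0, -1, 4, 1, -2, -3, -2],
   [0, -1, -1, -1, -2, -2, -2, -1, -1, -1, -1, 0, -1, -1, -1, 1, 5, 0, -2, -2],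
   [0, -1, -3, -2, -1, -3, -3, 3, -2, 1, 1, -3, -2, -2, -3, -2, 0, 4, -3, -1],
   [-3, -2, -4, -3, 1, -2, -2, -3, -3, -2, -1, -4, -4, -2, -3, -3, -2, -3, 11, 2],
   [-2, -2, -3, -2, 3, -3, 2, -1, -2, -1, -1, -2, -3, -1, -2, -2, -2, -1, 2, 7]]

def pvFindMiddle : List Int :=
  [0, -1, 1, 2, 3, 4, 5, 6, 7, -1, 8, 9, 10, 11, -1, 12, 13, 14, 15, 16, -1, 17, 18, -1, 19, -1]

-- A's score_matrix[find_middle[a]][find_middle[b]] (pyGet? is exact Python indexing; default hit only outside Pre_)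
def aPair (a b : Int) : Int :=
  (PySem.List.pyGet?
      ((PySem.List.pyGet? pvScoreMatrix ((PySem.List.pyGet? pvFindMiddle a).getD 0)).getD [])
      ((PySem.List.pyGet? pvFindMiddle b).getD 0)).getD 0

-- A's inner "for j in range(n1+1)" body, state = (dp2, pre)
def aInnerStep (s1c s2c : List Char) (dp1 : List Int) (i : Nat)
    (q : List Int × List Int) (j : Nat) : List Int × List Int :=
  let dp2 := q.1
  let pre := q.2
  if j = 0 then (dp2.set 0 ((i : Int) * (-5)), pre)
  else
    let a : Int := ((s1c.getD (j - 1) 'A').toNat : Int) - 65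
    let b : Int := ((s2c.getD (i - 1) 'A').toNat : Int) - 65
    let z : Int := dp1.getD (j - 1) 0 + aPair a b
    let dp2 := dp2.set j (max (max (dp1.getD j 0 - 5) (dp2.getD (j - 1) 0 - 5)) z)
    let pre :=
      if dp2.getD j 0 = z then pre.set j 0
      else if dp2.getD j 0 = dp1.getD j 0 - 5 then pre.set j 1
      else if dp2.getD j 0 = dp2.getD (j - 1) 0 - 5 then pre.set j 2
      else pre
    (dp2, pre)

-- A's outer "for i in range(1, int(n2/2)+1)" body, state = (dp1, dp2, pre); 'dp1[:] = dp2[:]'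
def aOuterStep (s1c s2c : List Char) (n1 : Nat)
    (st : List Int × List Int × List Int) (i : Nat) : List Int × List Int × List Int :=
  let q := (List.range (n1 + 1)).foldl (aInnerStep s1c s2c st.1 i) (st.2.1, st.2.2)
  (q.1, q.1, q.2)

def middle_score (s1 : String) (s2 : String) (number : Int) : List Int × List Int :=
  let n1 : Nat := s1.toList.length
  let n2 : Nat := s2.toList.length
  let n2 : Nat := if n2 % 2 ≠ 0 then (if number = 1 then n2 - 1 else n2 + 1) else n2
  let dp1 : List Int := List.replicate (n1 + 1) 0
  let dp2 : List Int := List.replicate (n1 + 1) 0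
  let pre : List Int := List.replicate (n1 + 1) 0
  let s1c : List Char := if number = 2 then s1.toList.reverse else s1.toList
  let s2c : List Char := if number = 2 then s2.toList.reverse else s2.toList
  let dp1 := (List.range (n1 + 1)).foldl (fun d i => d.set i (-5 * (i : Int))) dp1
  let st := (List.range' 1 (n2 / 2)).foldl (aOuterStep s1c s2c n1) (dp1, dp2, pre)
  let dp2 := if number = 2 then st.2.1.reverse else st.2.1
  let pre := if number = 2 then st.2.2.reverse else st.2.2
  (dp2, pre)

-- ===== PORT B =====
-- the 20 amino-acid letters, in score-matrix order (Source B's AMINO)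
def pvAmino : List Char :=
  ['A','C','D','E','F','G','H','I','K','L','M','N','P','Q','R','S','T','V','W','Y']

-- Source B _score: score_matrix[AMINO.index(c)][AMINO.index(d)] (index? none = ValueError, excluded by Pre_)
def bScore (c d : Char) : Int :=
  (pvScoreMatrix.getD ((PySem.List.index? pvAmino c).getD 0) []).getD
    ((PySem.List.index? pvAmino d).getD 0) 0

-- Source B inner "for i in range(1, m+1)": extend the fresh column
def bColStep (c : Char) (s2c : List Char) (col : List Int) (newcol : List Int) (i : Nat) : List Int :=
  newcol ++ [max (max (newcol.getD (i - 1) 0 - 5) (col.getD i 0 - 5))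
                 (col.getD (i - 1) 0 + bScore c (s2c.getD (i - 1) 'A'))]

-- Source B outer "for j in range(1, n1+1)": state = (col, top2)
def bOuterStep (s1c s2c : List Char) (m : Nat)
    (st : List Int × List (Int × Int)) (j : Nat) : List Int × List (Int × Int) :=
  let newcol := (List.range' 1 m).foldl (bColStep (s1c.getD (j - 1) 'A') s2c st.1) [-5 * (j : Int)]
  (newcol, st.2 ++ [(newcol.getD (m - 1) 0, newcol.getD m 0)])

-- Source B final traceback pass
def bPreStep (s1c : List Char) (d : Char) (top2 : List (Int × Int)) (dp2 : List Int)
    (pre : List Int) (j : Nat) : List Int :=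
  let z := (top2.getD (j - 1) (0, 0)).1 + bScore (s1c.getD (j - 1) 'A') d
  pre ++ [if dp2.getD j 0 = z then 0
          else if dp2.getD j 0 = (top2.getD j (0, 0)).1 - 5 then (1 : Int) else 2]

def middle_score_alt (s1 : String) (s2 : String) (number : Int) : List Int × List Int :=
  let n1 : Nat := s1.toList.length
  let n2 : Nat := s2.toList.length
  let n2 : Nat := if n2 % 2 ≠ 0 then (if number = 1 then n2 - 1 else n2 + 1) else n2
  let s1c : List Char := if number = 2 then s1.toList.reverse else s1.toList
  let s2c : List Char := if number = 2 then s2.toList.reverse else s2.toList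
  let m : Nat := n2 / 2
  if m = 0 then (List.replicate (n1 + 1) 0, List.replicate (n1 + 1) 0)
  else
    let col0 : List Int := (List.range (m + 1)).map (fun i : Nat => -5 * (i : Int))
    let st := (List.range' 1 n1).foldl (bOuterStep s1c s2c m)
        (col0, [(col0.getD (m - 1) 0, col0.getD m 0)])
    let dp2 := st.2.map Prod.snd
    let pre := (List.range' 1 n1).foldl (bPreStep s1c (s2c.getD (m - 1) 'A') st.2 dp2) [0]
    if number = 2 then (dp2.reverse, pre.reverse) else (dp2, pre)

-- ===== PRECONDITION & SPEC =====
-- Pre_ excludes inputs where some character actually read by the DP (all of s1, and the first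
-- half of s2 in loop orientation) is not one of the 20 amino-acid letters: there A either raises an
-- IndexError or returns a score picked up by accidental negative-index wraparound of find_middle,
-- while B raises a ValueError.
def pvOkChar (c : Char) : Bool := pvAmino.contains c

-- the half-length int(n2/2) of the (parity/number-adjusted) second string
def pvHalf (s2 : String) (number : Int) : Nat :=
  (if s2.toList.length % 2 ≠ 0 then
      (if number = 1 then s2.toList.length - 1 else s2.toList.length + 1)
    else s2.toList.length) / 2

def Pre_middle_score (s1 : String) (s2 : String) (number : Int) : Prop :=
  pvHalf s2 number = 0 ∨ s1.toList.length = 0 ∨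
    (s1.toList.all pvOkChar = true ∧
     ((if number = 2 then s2.toList.reverse else s2.toList).take (pvHalf s2 number)).all
        pvOkChar = true)

instance (s1 : String) (s2 : String) (number : Int) : Decidable (Pre_middle_score s1 s2 number) := by
  unfold Pre_middle_score; infer_instance

def pvWitness_middle_score : String × String × Int := ("ACDY", "WYCA", 1)

def Spec_middle_score (s1 : String) (s2 : String) (number : Int) (out : List Int × List Int) : Prop := out = middle_score_alt s1 s2 number
instance (s1 : String) (s2 : String) (number : Int) (out : List Int × List Int) : Decidable (Spec_middle_score s1 s2 number out) := by unfold Spec_middle_score; infer_instance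

-- ===== CLAIM (what is proved, stated in full; the proofs are below) =====
def Claim_equal_middle_score : Prop := ∀ (s1 : String) (s2 : String) (number : Int), Dom_middle_score s1 s2 number → Pre_middle_score s1 s2 number → Spec_middle_score s1 s2 number (middle_score s1 s2 number)

-- ===== LEMMAS AND PROOFS =====

-- the abstract alignment table both traversals fill: row i (over s2), column j (over s1)
def Mf (g : Nat → Nat → Int) : Nat → Nat → Int
  | 0, j => -5 * (j : Int)
  | i + 1, 0 => -5 * ((i : Int) + 1)
  | i + 1, j + 1 =>
      max (max (Mf g i (j + 1) - 5) (Mf g (i + 1) j - 5)) (Mf g i j + g (i + 1) (j + 1))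
termination_by i j => (i, j)

theorem Mf_zero_right (g : Nat → Nat → Int) (i : Nat) : Mf g i 0 = -5 * (i : Int) := by
  cases i with
  | zero => simp [Mf]
  | succ i => simp only [Mf]; push_cast; ring

theorem Mf_congr (g1 g2 : Nat → Nat → Int) (I J : Nat)
    (hg : ∀ i j, 1 ≤ i → i ≤ I → 1 ≤ j → j ≤ J → g1 i j = g2 i j) :
    ∀ i, i ≤ I → ∀ j, j ≤ J → Mf g1 i j = Mf g2 i j := by
  intro i
  induction i with
  | zero => intro _ j _; simp only [Mf]
  | succ i ihi =>
      intro hi j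
      induction j with
      | zero => intro _; simp only [Mf]
      | succ j ihj =>
          intro hj
          simp only [Mf]
          rw [ihi (by omega) (j + 1) hj, ihi (by omega) j (by omega), ihj (by omega),
            hg (i + 1) (j + 1) (by omega) hi (by omega) hj]

-- the value of one DP row of A: g j is the substitution score added in column j (j ≥ 1)
def rowF (g : Nat → Int) (prev : List Int) (i : Nat) : Nat → Int
  | 0 => (i : Int) * (-5)
  | j + 1 => max (max (prev.getD (j + 1) 0 - 5) (rowF g prev i j - 5)) (prev.getD j 0 + g (j + 1))

-- the traceback value A stores at position j ≥ 1 of a row (old = the overwritten value; unreachable last branch)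
def preF (g : Nat → Int) (prev : List Int) (i : Nat) (old : Int) (j : Nat) : Int :=
  if rowF g prev i j = prev.getD (j - 1) 0 + g j then 0
  else if rowF g prev i j = prev.getD j 0 - 5 then 1
  else if rowF g prev i j = rowF g prev i (j - 1) - 5 then 2
  else old

-- per-cell score functions of the two ports
def grA (s1c s2c : List Char) (i j : Nat) : Int :=
  aPair (((s1c.getD (j - 1) 'A').toNat : Int) - 65) (((s2c.getD (i - 1) 'A').toNat : Int) - 65)

def grB (s1c s2c : List Char) (i j : Nat) : Int :=
  bScore (s1c.getD (j - 1) 'A') (s2c.getD (i - 1) 'A')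

-- the whole DP table, row-major (A's traversal)
def rowsF (g : Nat → Nat → Int) (L : Nat) : Nat → List Int
  | 0 => (List.range L).map (fun j : Nat => -5 * (j : Int))
  | i + 1 => (List.range L).map (rowF (g (i + 1)) (rowsF g L i) (i + 1))

-- A's dp2 and pre arrays after i outer iterations
def dpR (g : Nat → Nat → Int) (L : Nat) : Nat → List Int
  | 0 => List.replicate L 0
  | i + 1 => rowsF g L (i + 1)

def preR (g : Nat → Nat → Int) (L : Nat) : Nat → List Int
  | 0 => List.replicate L 0
  | i + 1 => (List.range L).map (fun j =>
      if j = 0 then (preR g L i).getD 0 0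
      else preF (g (i + 1)) (rowsF g L i) (i + 1) ((preR g L i).getD j 0) j)

-- final-row traceback classification (B's second pass, entrywise)
def preB (g : Nat → Int) (prev dp2 : List Int) (j : Nat) : Int :=
  if j = 0 then 0
  else if dp2.getD j 0 = prev.getD (j - 1) 0 + g j then 0
  else if dp2.getD j 0 = prev.getD j 0 - 5 then 1
  else 2

theorem length_rowsF (g : Nat → Nat → Int) (L i : Nat) : (rowsF g L i).length = L := by
  cases i <;> simp [rowsF]

theorem length_dpR (g : Nat → Nat → Int) (L i : Nat) : (dpR g L i).length = L := by
  cases i <;> simp [dpR, length_rowsF]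

theorem length_preR (g : Nat → Nat → Int) (L i : Nat) : (preR g L i).length = L := by
  cases i <;> simp [preR]

theorem preR_head (g : Nat → Nat → Int) (L i : Nat) (hL : 0 < L) : (preR g L i).getD 0 0 = 0 := by
  induction i with
  | zero => simp [preR, List.getD, hL]
  | succ i ih =>
      have h0 : (preR g L i)[0]?.getD 0 = 0 := by simpa [List.getD] using ih
      simp [preR, List.getD, hL, h0]

theorem rowF_eq_Mf (g : Nat → Nat → Int) (L i : Nat) (prev : List Int)
    (hp : ∀ j, j < L → prev.getD j 0 = Mf g i j) :
    ∀ j, j < L → rowF (g (i + 1)) prev (i + 1) j = Mf g (i + 1) j := by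
  intro j
  induction j with
  | zero =>
      intro _
      show ((i + 1 : Nat) : Int) * (-5) = Mf g (i + 1) 0
      simp only [Mf]; push_cast; ring
  | succ j ihj =>
      intro hj
      rw [rowF, ihj (by omega), hp (j + 1) hj, hp j (by omega)]
      simp only [Mf]

theorem rowsF_getD (g : Nat → Nat → Int) (L : Nat) :
    ∀ i, ∀ j, j < L → (rowsF g L i).getD j 0 = Mf g i j := by
  intro i
  induction i with
  | zero =>
      intro j hj
      rw [rowsF, PySem.List.getD_map_range _ _ _ _ hj]
      simp only [Mf]
  | succ i ih =>
      intro j hj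
      rw [rowsF, PySem.List.getD_map_range _ _ _ _ hj]
      exact rowF_eq_Mf g L i _ ih j hj

-- the value of one DP column of B: h i is the substitution score added in row i (i ≥ 1)
def colG (h : Nat → Int) (col : List Int) (j : Nat) : Nat → Int
  | 0 => -5 * (j : Int)
  | i + 1 => max (max (colG h col j i - 5) (col.getD (i + 1) 0 - 5)) (col.getD i 0 + h (i + 1))

theorem colG_eq_Mf (g : Nat → Nat → Int) (m j : Nat) (col : List Int)
    (hc : ∀ i, i < m + 1 → col.getD i 0 = Mf g i j) :
    ∀ i, i < m + 1 → colG (fun i' => g i' (j + 1)) col (j + 1) i = Mf g i (j + 1) := by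
  intro i
  induction i with
  | zero => intro _; simp only [colG, Mf]
  | succ i ihi =>
      intro hi
      rw [colG, ihi (by omega), hc (i + 1) hi, hc i (by omega)]
      simp only [Mf]

theorem bCol_fold (c : Char) (s2c : List Char) (col : List Int) (j : Nat) : ∀ m,
    (List.range' 1 m).foldl (bColStep c s2c col) [-5 * (j : Int)] =
    (List.range (m + 1)).map (colG (fun i => bScore c (s2c.getD (i - 1) 'A')) col j) := by
  intro m
  induction m with
  | zero => simp [List.range_one]; rfl
  | succ m ih =>
      rw [List.range'_concat, List.foldl_append, ih]
      simp only [List.foldl_cons, List.foldl_nil, bColStep]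
      have e1 : 1 + 1 * m - 1 = m := by omega
      have e2 : 1 + 1 * m = m + 1 := by omega
      rw [e1, e2, PySem.List.getD_map_range _ _ _ _ (by omega)]
      rw [show List.range (m + 1 + 1) = List.range (m + 1) ++ [m + 1] from List.range_succ,
        List.map_append]
      congr 1

-- B's traceback entry
def bPreEntry (s1c : List Char) (d : Char) (top2 : List (Int × Int)) (dp2 : List Int) (j : Nat) : Int :=
  if j = 0 then 0
  else if dp2.getD j 0 = (top2.getD (j - 1) (0, 0)).1 + bScore (s1c.getD (j - 1) 'A') d then 0
  else if dp2.getD j 0 = (top2.getD j (0, 0)).1 - 5 then 1 else 2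

theorem bPre_fold (s1c : List Char) (d : Char) (top2 : List (Int × Int)) (dp2 : List Int) : ∀ t,
    (List.range' 1 t).foldl (bPreStep s1c d top2 dp2) [0] =
    (List.range (t + 1)).map (bPreEntry s1c d top2 dp2) := by
  intro t
  induction t with
  | zero => simp [List.range_one]; rfl
  | succ t ih =>
      rw [List.range'_concat, List.foldl_append, ih]
      simp only [List.foldl_cons, List.foldl_nil, bPreStep]
      have e2 : 1 + 1 * t = t + 1 := by omega
      rw [e2]
      rw [show List.range (t + 1 + 1) = List.range (t + 1) ++ [t + 1] from List.range_succ,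
        List.map_append]
      congr 1

theorem bOuter_fold (s1c s2c : List Char) (m : Nat) (hm : 1 ≤ m) : ∀ t,
    (List.range' 1 t).foldl (bOuterStep s1c s2c m)
      ((List.range (m + 1)).map (fun i : Nat => -5 * (i : Int)),
       [(((List.range (m + 1)).map (fun i : Nat => -5 * (i : Int))).getD (m - 1) 0,
         ((List.range (m + 1)).map (fun i : Nat => -5 * (i : Int))).getD m 0)]) =
    ((List.range (m + 1)).map (fun i => Mf (grB s1c s2c) i t),
     (List.range (t + 1)).map (fun j => (Mf (grB s1c s2c) (m - 1) j, Mf (grB s1c s2c) m j))) := by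
  intro t
  induction t with
  | zero =>
      rw [show List.range' 1 0 = ([] : List Nat) from rfl, List.foldl_nil]
      refine Prod.ext ?_ ?_
      · exact List.map_congr_left (fun i _ => (Mf_zero_right _ i).symm)
      · rw [List.range_one, List.map_cons, List.map_nil,
          PySem.List.getD_map_range _ _ _ _ (by omega : m - 1 < m + 1),
          PySem.List.getD_map_range _ _ _ _ (by omega : m < m + 1),
          Mf_zero_right, Mf_zero_right]
  | succ t ih =>
      rw [List.range'_concat, List.foldl_append, ih]
      simp only [List.foldl_cons, List.foldl_nil, bOuterStep]
      have e2 : 1 + 1 * t = t + 1 := by omega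
      rw [e2]
      have hcol : (List.range' 1 m).foldl
          (bColStep (s1c.getD (t + 1 - 1) 'A') s2c
            ((List.range (m + 1)).map (fun i => Mf (grB s1c s2c) i t)))
          [-5 * ((t + 1 : Nat) : Int)] =
          (List.range (m + 1)).map (fun i => Mf (grB s1c s2c) i (t + 1)) := by
        rw [bCol_fold]
        refine List.map_congr_left (fun i hi => ?_)
        have hi' : i < m + 1 := by simpa [List.mem_range] using hi
        have := colG_eq_Mf (grB s1c s2c) m t
          ((List.range (m + 1)).map (fun i => Mf (grB s1c s2c) i t))
          (fun i hi => PySem.List.getD_map_range _ _ _ _ hi) i hi'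
        rw [← this]
        rfl
      rw [hcol]
      refine Prod.ext rfl ?_
      dsimp only
      rw [PySem.List.getD_map_range _ _ _ _ (by omega : m - 1 < m + 1),
        PySem.List.getD_map_range _ _ _ _ (by omega : m < m + 1)]
      rw [show List.range (t + 1 + 1) = List.range (t + 1) ++ [t + 1] from List.range_succ,
        List.map_append, List.map_singleton]

theorem eq_of_getD {xs ys : List Int} (h1 : xs.length = ys.length)
    (h : ∀ j, j < xs.length → xs.getD j 0 = ys.getD j 0) : xs = ys := by
  apply List.ext_getElem h1
  intro j hj hj'
  have := h j hj
  rwa [List.getD_eq_getElem xs 0 hj, List.getD_eq_getElem ys 0 hj'] at this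

theorem getD_set_self (xs : List Int) (k : Nat) (v : Int) (h : k < xs.length) :
    (xs.set k v).getD k 0 = v := by
  simp [List.getD, h]

theorem getD_set_ne (xs : List Int) (k j : Nat) (v : Int) (h : j ≠ k) :
    (xs.set k v).getD j 0 = xs.getD j 0 := by
  simp [List.getD, List.getElem?_set_ne (by omega : k ≠ j)]

theorem dp1_init_aux (n1 : Nat) (xs : List Int) (f : Nat → Int) (hx : xs.length = n1 + 1) :
    ∀ k, k ≤ n1 + 1 →
      ((List.range k).foldl (fun d i => d.set i (f i)) xs).length = n1 + 1 ∧
      (∀ j, j < n1 + 1 → ((List.range k).foldl (fun d i => d.set i (f i)) xs).getD j 0 =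
        if j < k then f j else xs.getD j 0) := by
  intro k
  induction k with
  | zero => intro _; exact ⟨hx, fun j _ => by simp⟩
  | succ k ih =>
      intro hk
      obtain ⟨L1, H1⟩ := ih (by omega)
      rw [show List.range (k + 1) = List.range k ++ [k] from List.range_succ, List.foldl_append]
      simp only [List.foldl_cons, List.foldl_nil]
      refine ⟨by simpa using L1, fun j hj => ?_⟩
      by_cases hkj : j = k
      · subst hkj
        rw [getD_set_self _ _ _ (by omega), if_pos (by omega)]
      · rw [getD_set_ne _ _ _ _ hkj, H1 j hj]
        by_cases hlt : j < k
        · rw [if_pos hlt, if_pos (by omega)]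
        · rw [if_neg hlt, if_neg (by omega)]

theorem dp1_init (n1 : Nat) :
    (List.range (n1 + 1)).foldl (fun d i => d.set i (-5 * (i : Int)))
      (List.replicate (n1 + 1) (0 : Int)) = (List.range (n1 + 1)).map (fun j : Nat => -5 * (j : Int)) := by
  obtain ⟨L1, H1⟩ := dp1_init_aux n1 (List.replicate (n1 + 1) (0 : Int))
    (fun i => -5 * (i : Int)) (by simp) (n1 + 1) le_rfl
  refine eq_of_getD (by rw [L1, List.length_map, List.length_range]) (fun j hj => ?_)
  rw [L1] at hj
  rw [H1 j hj, if_pos hj, PySem.List.getD_map_range _ _ _ _ hj]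

theorem aInner_aux (s1c s2c : List Char) (prev cur0 pre0 : List Int) (i n1 : Nat)
    (hc : cur0.length = n1 + 1) (hp : pre0.length = n1 + 1) :
    ∀ k, k ≤ n1 + 1 →
      (((List.range k).foldl (aInnerStep s1c s2c prev i) (cur0, pre0)).1.length = n1 + 1 ∧
       ((List.range k).foldl (aInnerStep s1c s2c prev i) (cur0, pre0)).2.length = n1 + 1) ∧
      (∀ j, j < n1 + 1 →
        ((List.range k).foldl (aInnerStep s1c s2c prev i) (cur0, pre0)).1.getD j 0 =
          (if j < k then rowF (grA s1c s2c i) prev i j else cur0.getD j 0)) ∧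
      (∀ j, j < n1 + 1 →
        ((List.range k).foldl (aInnerStep s1c s2c prev i) (cur0, pre0)).2.getD j 0 =
          (if 1 ≤ j ∧ j < k then preF (grA s1c s2c i) prev i (pre0.getD j 0) j
           else pre0.getD j 0)) := by
  intro k
  induction k with
  | zero =>
      intro _
      exact ⟨⟨hc, hp⟩, fun j hj => by simp, fun j hj => by simp⟩
  | succ k ih =>
      intro hk
      obtain ⟨⟨L1, L2⟩, H1, H2⟩ := ih (by omega)
      rw [show List.range (k + 1) = List.range k ++ [k] from List.range_succ,
        List.foldl_append]
      simp only [List.foldl_cons, List.foldl_nil]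
      generalize hgen : (List.range k).foldl (aInnerStep s1c s2c prev i) (cur0, pre0) = cp
        at L1 L2 H1 H2 ⊢
      obtain ⟨c, p⟩ := cp
      simp only at L1 L2 H1 H2
      by_cases h0 : k = 0
      · subst h0
        dsimp only [aInnerStep]
        rw [if_pos rfl]
        refine ⟨⟨by simpa using L1, L2⟩, ?_, ?_⟩
        · intro j hj
          dsimp only
          by_cases hj0 : j = 0
          · subst hj0
            rw [getD_set_self _ _ _ (by omega), if_pos (by omega)]
            rfl
          · rw [getD_set_ne _ _ _ _ hj0, if_neg (by omega)]
            have := H1 j hj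
            rwa [if_neg (by omega)] at this
        · intro j hj
          have := H2 j hj
          rw [if_neg (by omega)] at this
          rwa [if_neg (by omega)]
      · have hk1 : 1 ≤ k := by omega
        dsimp only [aInnerStep]
        rw [if_neg h0]
        have hck : c.getD (k - 1) 0 = rowF (grA s1c s2c i) prev i (k - 1) := by
          have := H1 (k - 1) (by omega)
          rwa [if_pos (by omega)] at this
        have hv : max (max (prev.getD k 0 - 5) (c.getD (k - 1) 0 - 5))
            (prev.getD (k - 1) 0 +
              aPair (((s1c.getD (k - 1) 'A').toNat : Int) - 65)
                (((s2c.getD (i - 1) 'A').toNat : Int) - 65)) = rowF (grA s1c s2c i) prev i k := by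
          conv_rhs => rw [show k = k - 1 + 1 by omega]
          simp only [rowF, grA]
          rw [hck, show k - 1 + 1 = k by omega]
        refine ⟨⟨by simpa using L1, ?_⟩, ?_, ?_⟩
        · dsimp only
          split_ifs <;> simpa using L2
        · intro j hj
          dsimp only
          by_cases hjk : j = k
          · subst hjk
            rw [getD_set_self c _ _ (by omega), if_pos (by omega), hv]
          · rw [getD_set_ne _ _ _ _ hjk]
            have := H1 j hj
            by_cases hlt : j < k
            · rw [if_pos (show j < k + 1 by omega)]
              rwa [if_pos hlt] at this
            · rw [if_neg (by omega)]
              rwa [if_neg hlt] at this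
        · intro j hj
          dsimp only
          by_cases hjk : j = k
          · subst hjk
            have hpk : p.getD j 0 = pre0.getD j 0 := by
              have := H2 j (by omega)
              rwa [if_neg (by omega)] at this
            have hcond : 1 ≤ j ∧ j < j + 1 := ⟨hk1, Nat.lt_succ_self j⟩
            conv_rhs => rw [if_pos hcond]
            simp only [preF, grA]
            rw [getD_set_self c _ _ (by omega), getD_set_ne c _ _ _ (by omega : j - 1 ≠ j),
              hv, hck]
            split_ifs
            · rw [getD_set_self p _ _ (by omega)]
            · rw [getD_set_self p _ _ (by omega)]
            · rw [getD_set_self p _ _ (by omega)]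
            · exact hpk
          · have := H2 j hj
            by_cases hlt : 1 ≤ j ∧ j < k
            · rw [if_pos hlt] at this
              have hc2 : 1 ≤ j ∧ j < k + 1 := ⟨hlt.1, by omega⟩
              conv_rhs => rw [if_pos hc2]
              split_ifs <;> (try rw [getD_set_ne _ _ _ _ hjk]) <;> exact this
            · rw [if_neg hlt] at this
              have hc2 : ¬(1 ≤ j ∧ j < k + 1) := by omega
              conv_rhs => rw [if_neg hc2]
              split_ifs <;> (try rw [getD_set_ne _ _ _ _ hjk]) <;> exact this

theorem aInner_fold (s1c s2c : List Char) (prev cur0 pre0 : List Int) (i n1 : Nat)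
    (hc : cur0.length = n1 + 1) (hp : pre0.length = n1 + 1) :
    (List.range (n1 + 1)).foldl (aInnerStep s1c s2c prev i) (cur0, pre0) =
    ((List.range (n1 + 1)).map (rowF (grA s1c s2c i) prev i),
     (List.range (n1 + 1)).map (fun j =>
       if j = 0 then pre0.getD 0 0
       else preF (grA s1c s2c i) prev i (pre0.getD j 0) j)) := by
  obtain ⟨⟨L1, L2⟩, H1, H2⟩ := aInner_aux s1c s2c prev cur0 pre0 i n1 hc hp (n1 + 1) le_rfl
  refine Prod.ext ?_ ?_
  · refine eq_of_getD (by rw [L1, List.length_map, List.length_range]) (fun j hj => ?_)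
    rw [L1] at hj
    rw [H1 j hj, if_pos hj, PySem.List.getD_map_range _ _ _ _ hj]
  · refine eq_of_getD (by rw [L2, List.length_map, List.length_range]) (fun j hj => ?_)
    rw [L2] at hj
    rw [H2 j hj, PySem.List.getD_map_range _ _ _ _ hj]
    by_cases hj0 : j = 0
    · subst hj0
      rw [if_neg (by omega), if_pos rfl]
    · rw [if_pos ⟨by omega, hj⟩, if_neg hj0]

theorem aOuter_fold (s1c s2c : List Char) (n1 m : Nat) :
    (List.range' 1 m).foldl (aOuterStep s1c s2c n1)
      ((List.range (n1 + 1)).map (fun j : Nat => -5 * (j : Int)),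
       List.replicate (n1 + 1) 0, List.replicate (n1 + 1) 0) =
    (rowsF (grA s1c s2c) (n1 + 1) m, dpR (grA s1c s2c) (n1 + 1) m, preR (grA s1c s2c) (n1 + 1) m) := by
  induction m with
  | zero => rfl
  | succ m ih =>
      rw [List.range'_concat, List.foldl_append, ih]
      simp only [List.foldl_cons, List.foldl_nil, aOuterStep]
      rw [show 1 + 1 * m = m + 1 by omega]
      rw [aInner_fold s1c s2c (rowsF (grA s1c s2c) (n1 + 1) m)
        (dpR (grA s1c s2c) (n1 + 1) m) (preR (grA s1c s2c) (n1 + 1) m) (m + 1) n1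
        (length_dpR _ _ _) (length_preR _ _ _)]
      rfl

theorem pre_final (g : Nat → Nat → Int) (n1 t : Nat) :
    preR g (n1 + 1) (t + 1) =
    (List.range (n1 + 1)).map (preB (g (t + 1)) (rowsF g (n1 + 1) t) (rowsF g (n1 + 1) (t + 1))) := by
  rw [preR]
  refine List.map_congr_left (fun j hj => ?_)
  have hjL : j < n1 + 1 := by simpa [List.mem_range] using hj
  by_cases hj0 : j = 0
  · subst hj0
    rw [if_pos rfl, preR_head _ _ _ (by omega)]
    rfl
  · rw [if_neg hj0]
    obtain ⟨u, rfl⟩ : ∃ u, j = u + 1 := ⟨j - 1, by omega⟩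
    have hdp2 : (rowsF g (n1 + 1) (t + 1)).getD (u + 1) 0 =
        rowF (g (t + 1)) (rowsF g (n1 + 1) t) (t + 1) (u + 1) := by
      rw [show rowsF g (n1 + 1) (t + 1) =
        (List.range (n1 + 1)).map (rowF (g (t + 1)) (rowsF g (n1 + 1) t) (t + 1)) from rfl]
      exact PySem.List.getD_map_range _ _ _ _ hjL
    simp only [preF, preB, hdp2, if_neg (Nat.succ_ne_zero u), Nat.add_sub_cancel]
    set A := (rowsF g (n1 + 1) t).getD (u + 1) 0 - 5 with hA
    set B := rowF (g (t + 1)) (rowsF g (n1 + 1) t) (t + 1) u - 5 with hB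
    set C := (rowsF g (n1 + 1) t).getD u 0 + g (t + 1) (u + 1) with hC
    have hmax : rowF (g (t + 1)) (rowsF g (n1 + 1) t) (t + 1) (u + 1) = max (max A B) C := by
      simp only [rowF]
      rw [hA, hB, hC]
    rw [hmax]
    split_ifs with h1 h2 h3
    · rfl
    · rfl
    · rfl
    · exfalso
      rcases max_choice (max A B) C with h | h
      · rcases max_choice A B with h' | h'
        · exact h2 (h.trans h')
        · exact h3 (h.trans h')
      · exact h1 h

-- A's row/column index of an amino-acid letter, and B's
def aIdx (c : Char) : Int := (PySem.List.pyGet? pvFindMiddle ((c.toNat : Int) - 65)).getD 0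

def bIdx (c : Char) : Nat := (PySem.List.index? pvAmino c).getD 0

-- on the 20 amino-acid letters the two index mechanisms agree
theorem idx_eq (c : Char) (hc : c ∈ pvAmino) : aIdx c = ((bIdx c : Nat) : Int) := by
  fin_cases hc <;> decide

-- hence the two scoring mechanisms agree on the amino-acid alphabet
theorem pair_ok (c d : Char) (hc : c ∈ pvAmino) (hd : d ∈ pvAmino) :
    aPair (((c.toNat : Int)) - 65) (((d.toNat : Int)) - 65) = bScore c d := by
  show (PySem.List.pyGet? ((PySem.List.pyGet? pvScoreMatrix (aIdx c)).getD []) (aIdx d)).getD 0 =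
    bScore c d
  rw [idx_eq c hc, idx_eq d hd, PySem.List.pyGet?_natCast, PySem.List.pyGet?_natCast]
  rfl

-- ===== VERDICT (by name: the statement is the Claim_ definition above) =====
theorem middle_score_spec : Claim_equal_middle_score := by
  intro s1 s2 number _ hpre
  show middle_score s1 s2 number = middle_score_alt s1 s2 number
  unfold middle_score middle_score_alt
  unfold Pre_middle_score pvHalf at hpre
  dsimp only
  try dsimp only at hpre
  set n1 := s1.toList.length with hn1
  set s1c := (if number = 2 then s1.toList.reverse else s1.toList) with hs1c
  set s2c := (if number = 2 then s2.toList.reverse else s2.toList) with hs2c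
  set n2 := (if s2.toList.length % 2 ≠ 0 then
      (if number = 1 then s2.toList.length - 1 else s2.toList.length + 1)
    else s2.toList.length) with hn2
  set m := n2 / 2 with hm
  by_cases hm0 : m = 0
  · rw [hm0]
    simp only [reduceIte]
    split_ifs <;> simp [List.reverse_replicate]
  · have hm1 : 1 ≤ m := by omega
    have hlen1 : s1c.length = n1 := by
      rw [hs1c, hn1]; split_ifs <;> simp
    have HH : ∀ i j : Nat, 1 ≤ i → i ≤ m → 1 ≤ j → j ≤ n1 →
        grA s1c s2c i j = grB s1c s2c i j := by
      rcases hpre with h | h | ⟨h1ok, h2ok⟩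
      · exact absurd h hm0
      · intro i j _ _ hj1 hjn
        omega
      · simp only [List.all_eq_true, pvOkChar, List.contains_iff_mem] at h1ok h2ok
        intro i j hi1 him hj1 hjn
        have hcmem : s1c.getD (j - 1) 'A' ∈ s1c := by
          rw [List.getD_eq_getElem _ _ (by omega : j - 1 < s1c.length)]
          exact List.getElem_mem _
        have hsub : ∀ x, x ∈ s1c → x ∈ s1.toList := by
          rw [hs1c]
          split_ifs
          · exact fun x hx => List.mem_reverse.mp hx
          · exact fun x hx => hx
        have hcam : s1c.getD (j - 1) 'A' ∈ pvAmino := h1ok _ (hsub _ hcmem)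
        have hdam : s2c.getD (i - 1) 'A' ∈ pvAmino := by
          by_cases hd : i - 1 < s2c.length
          · apply h2ok
            rw [List.getD_eq_getElem _ _ hd]
            have hlt : i - 1 < (s2c.take m).length := by
              rw [List.length_take]; omega
            have := List.getElem_mem hlt
            rwa [List.getElem_take] at this
          · rw [List.getD_eq_default _ _ (by omega)]
            decide
        show grA s1c s2c i j = grB s1c s2c i j
        unfold grA grB
        exact pair_ok _ _ hcam hdam
    rw [dp1_init, aOuter_fold, if_neg hm0, bOuter_fold s1c s2c m hm1 n1, bPre_fold]
    dsimp only
    obtain ⟨t, ht⟩ : ∃ t, m = t + 1 := ⟨m - 1, by omega⟩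
    have HMf : ∀ i ≤ m, ∀ j ≤ n1, Mf (grA s1c s2c) i j = Mf (grB s1c s2c) i j :=
      Mf_congr (grA s1c s2c) (grB s1c s2c) m n1 HH
    have Edp : dpR (grA s1c s2c) (n1 + 1) m =
        ((List.range (n1 + 1)).map
          (fun j => (Mf (grB s1c s2c) (m - 1) j, Mf (grB s1c s2c) m j))).map Prod.snd := by
      rw [List.map_map]
      refine eq_of_getD (by rw [length_dpR, List.length_map, List.length_range]) (fun j hj => ?_)
      rw [length_dpR] at hj
      rw [PySem.List.getD_map_range _ _ _ _ hj]
      rw [ht]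
      show (rowsF (grA s1c s2c) (n1 + 1) (t + 1)).getD j 0 = _
      rw [rowsF_getD _ _ _ j hj, ← ht]
      exact HMf m le_rfl j (by omega)
    have Epre : preR (grA s1c s2c) (n1 + 1) m =
        (List.range (n1 + 1)).map
          (bPreEntry s1c (s2c.getD (m - 1) 'A')
            ((List.range (n1 + 1)).map
              (fun j => (Mf (grB s1c s2c) (m - 1) j, Mf (grB s1c s2c) m j)))
            (((List.range (n1 + 1)).map
              (fun j => (Mf (grB s1c s2c) (m - 1) j, Mf (grB s1c s2c) m j))).map Prod.snd)) := by
      rw [ht, pre_final]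
      refine List.map_congr_left (fun j hj => ?_)
      have hjL : j < n1 + 1 := by simpa [List.mem_range] using hj
      by_cases hj0 : j = 0
      · subst hj0; rfl
      · unfold preB bPreEntry
        rw [if_neg hj0, if_neg hj0]
        rw [List.map_map]
        rw [PySem.List.getD_map_range _ _ _ _ hjL,
          PySem.List.getD_map_range (fun j => ((Mf (grB s1c s2c) (t + 1 - 1) j, Mf (grB s1c s2c) (t + 1) j) : Int × Int)) _ _ _ (by omega : j - 1 < n1 + 1),
          PySem.List.getD_map_range (fun j => ((Mf (grB s1c s2c) (t + 1 - 1) j, Mf (grB s1c s2c) (t + 1) j) : Int × Int)) _ _ _ hjL]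
        rw [rowsF_getD _ _ _ j hjL, rowsF_getD _ _ _ (j - 1) (by omega),
          rowsF_getD _ _ _ j hjL]
        have e1 : t + 1 - 1 = t := rfl
        rw [e1]
        rw [HMf (t + 1) (by omega) j (by omega), HMf t (by omega) (j - 1) (by omega),
          HMf t (by omega) j (by omega)]
        have hg : grA s1c s2c (t + 1) j = grB s1c s2c (t + 1) j :=
          HH (t + 1) j (by omega) (by omega) (by omega) (by omega)
        rw [hg]
        rfl
    rw [Edp, Epre]
    split_ifs <;> rfl
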